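-- pv_equiv track=rewrite | github.com/naterush/saga | saga/data_types/multi_dim_list/mdl_merge_utils.py | create_merged_file
-- ===== SOURCE A (Python) =====
-- def create_merged_file(chunks):
--     merged_file = []
--     conflicting_chunks = []
--     for i, chunk in enumerate(chunks):
--         (s_A, s_O, s_B) = chunk
--         if not s_A == s_B:
--             conflicting_chunks.append((i, chunk))
--         else:
--             merged_file.extend(s_A)
--
--     if not any(conflicting_chunks):
--         return merged_file
--     return None
-- ===== SOURCE B (Python) =====
-- def create_merged_file(chunks):
--     if any(s_A != s_B for (s_A, s_O, s_B) in chunks):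
--         return None
--     return [x for (s_A, _s_O, _s_B) in chunks for x in s_A]
-- ===== Notes on version B (the rewrite author's own statement) =====
-- stated objective: simpler
-- what changed: Replaces the single interleaved accumulation loop (building both a merged list and an indexed conflict list) with a conflict check via any() followed by a flattening comprehension; no index bookkeeping and no conflict list are maintained.
import Mathlib
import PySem

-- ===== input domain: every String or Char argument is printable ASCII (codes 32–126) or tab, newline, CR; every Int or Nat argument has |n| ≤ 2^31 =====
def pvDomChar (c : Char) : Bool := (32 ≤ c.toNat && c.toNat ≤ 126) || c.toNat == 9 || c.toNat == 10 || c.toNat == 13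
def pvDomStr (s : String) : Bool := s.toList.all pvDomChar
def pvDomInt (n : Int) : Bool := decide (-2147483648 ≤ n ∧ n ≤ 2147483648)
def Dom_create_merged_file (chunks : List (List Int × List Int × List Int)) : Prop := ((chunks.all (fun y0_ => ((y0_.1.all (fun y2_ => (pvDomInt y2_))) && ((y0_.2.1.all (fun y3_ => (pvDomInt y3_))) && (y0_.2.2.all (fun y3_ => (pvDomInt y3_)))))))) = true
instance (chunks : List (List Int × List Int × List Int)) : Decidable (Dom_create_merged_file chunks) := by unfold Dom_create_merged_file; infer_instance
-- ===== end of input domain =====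

-- B replaces A's interleaved merged/conflict accumulation loop with a conflict check (any) plus a flattening pass; same cost, simpler.


-- ===== PORT A =====
-- the for-loop of A: state = (merged_file, conflicting_chunks), i the enumerate index
def create_merged_file_loop : Int → List (List Int × List Int × List Int) → List Int →
    List (Int × (List Int × List Int × List Int)) → List Int × List (Int × (List Int × List Int × List Int))
  | _, [], merged, conf => (merged, conf)
  | i, chunk :: rest, merged, conf =>
    if ¬ (chunk.1 = chunk.2.2) then
      create_merged_file_loop (i + 1) rest merged (conf ++ [(i, chunk)])
    else
      create_merged_file_loop (i + 1) rest (merged ++ chunk.1) conf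

def create_merged_file (chunks : List (List Int × List Int × List Int)) : Option (List Int) :=
  -- `any(conflicting_chunks)`: every element is a nonempty tuple, hence truthy, so this is emptiness of the list
  let st := create_merged_file_loop 0 chunks [] []
  if st.2.isEmpty then some st.1 else none

-- ===== PORT B =====
def create_merged_file_alt (chunks : List (List Int × List Int × List Int)) : Option (List Int) :=
  if chunks.any (fun c => !(c.1 == c.2.2)) then none
  else some (chunks.flatMap (fun c => c.1))

-- ===== PRECONDITION & SPEC =====
def Spec_create_merged_file (chunks : List (List Int × List Int × List Int)) (out : Option (List Int)) : Prop := out = create_merged_file_alt chunks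
instance (chunks : List (List Int × List Int × List Int)) (out : Option (List Int)) : Decidable (Spec_create_merged_file chunks out) := by unfold Spec_create_merged_file; infer_instance

-- ===== CLAIM (what is proved, stated in full; the proofs are below) =====
def Claim_equal_create_merged_file : Prop := ∀ (chunks : List (List Int × List Int × List Int)), Dom_create_merged_file chunks → Spec_create_merged_file chunks (create_merged_file chunks)

-- ===== LEMMAS AND PROOFS =====

theorem create_merged_file_loop_char (chunks : List (List Int × List Int × List Int)) :
    ∀ (i : Int) (merged : List Int) (conf : List (Int × (List Int × List Int × List Int))),
    (if (create_merged_file_loop i chunks merged conf).2.isEmpty then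
       some (create_merged_file_loop i chunks merged conf).1 else none) =
    (if conf.isEmpty then
       (if chunks.any (fun c => !(c.1 == c.2.2)) then none
        else some (merged ++ chunks.flatMap (fun c => c.1)))
     else none) := by
  induction chunks with
  | nil => intro i merged conf; simp [create_merged_file_loop]
  | cons chunk rest ih =>
    intro i merged conf
    by_cases h : chunk.1 = chunk.2.2
    · simp only [create_merged_file_loop, h, not_true, if_false]
      rw [ih]
      have hz : (!(chunk.1 == chunk.2.2)) = false := by simp [h]
      simp only [List.any_cons, hz, Bool.false_or, List.flatMap_cons, List.append_assoc]
      rw [h]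
    · simp only [create_merged_file_loop, if_pos h]
      rw [ih]
      have hb : (chunk.1 == chunk.2.2) = false := beq_eq_false_iff_ne.mpr h
      simp [hb]

-- ===== VERDICT (by name: the statement is the Claim_ definition above) =====
theorem create_merged_file_spec : Claim_equal_create_merged_file := by
  intro chunks _
  unfold Spec_create_merged_file create_merged_file create_merged_file_alt
  rw [create_merged_file_loop_char chunks 0 [] []]
  simp
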